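-- pv_equiv track=rewrite | github.com/jin8495/jin8495.github.io | publish/md2post/Property.py | __iter_prpts
-- ===== SOURCE A (Python) =====
-- def __iter_prpts(prpts_lines):
--     """
--     Iterate over all properties in the frontmatter.
--
--     Arguments:
--     - prpts_lines (list): Lines representing the frontmatter.
--
--     Yields:
--     - list: Lines representing a single property.
--     """
--     num_line_prpt_start = 0
--     num_line_prpt_nxt_start = 0
--     for i, line in enumerate(prpts_lines):
--         if ":" in line:
--             num_line_prpt_start = i
--
--             # Search for the next colon
--             found_nxt_colon = False
--             prpt_lines = prpts_lines[num_line_prpt_start+1:]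
--             for j, line_ in enumerate(prpt_lines):
--                 if ":" in line_:
--                     num_line_prpt_nxt_start = i + j + 1
--                     found_nxt_colon = True
--                     break
--             if not found_nxt_colon:
--                 num_line_prpt_nxt_start = len(prpts_lines) + 1
--             prpt_lines = prpts_lines[num_line_prpt_start:num_line_prpt_nxt_start]
--             yield prpt_lines
-- ===== SOURCE B (Python) =====
-- def __iter_prpts(prpts_lines):
--     """One pass: collect colon-line indices, then yield the slice between consecutive indices."""
--     idxs = [i for i, line in enumerate(prpts_lines) if ":" in line]
--     bounds = idxs[1:] + [len(prpts_lines)]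
--     for start, end in zip(idxs, bounds):
--         yield prpts_lines[start:end]
-- ===== Notes on version B (the rewrite author's own statement) =====
-- stated objective: simpler
-- what changed: B collects the colon-line indices in one pass and yields the slice between consecutive indices, instead of re-slicing the whole tail and rescanning for the next colon at every colon line.
import Mathlib
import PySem

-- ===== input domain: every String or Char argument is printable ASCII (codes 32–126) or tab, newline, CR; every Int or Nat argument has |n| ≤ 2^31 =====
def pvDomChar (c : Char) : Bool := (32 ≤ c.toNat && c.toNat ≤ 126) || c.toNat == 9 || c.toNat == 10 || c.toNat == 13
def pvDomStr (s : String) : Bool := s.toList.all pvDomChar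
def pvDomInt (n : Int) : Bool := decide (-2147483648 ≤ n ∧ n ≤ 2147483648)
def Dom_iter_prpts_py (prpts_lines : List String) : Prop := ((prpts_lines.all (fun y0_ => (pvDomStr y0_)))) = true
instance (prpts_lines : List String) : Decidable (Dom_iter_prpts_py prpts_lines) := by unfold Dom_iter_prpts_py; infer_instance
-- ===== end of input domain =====

-- B replaces A's per-colon-line tail slice and rescan by one pass that collects the
-- colon indices and slices between consecutive ones (objective: simpler).

-- ===== PORT A =====
-- inner loop of A: first index (counting from j) of a line containing ":"
def findNextA : List String → Nat → Option Nat
  | [], _ => none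
  | l :: ls, j => if PySem.Str.isIn ":" l then some j else findNextA ls (j + 1)

-- outer loop of A: i is the enumerate counter, the third argument the remaining lines
def loopA (lines : List String) (i : Nat) : List String → List (List String)
  | [] => []
  | line :: rest =>
    if PySem.Str.isIn ":" line then
      let nxt : Nat :=
        match findNextA (PySem.List.slice lines (some ((i : Int) + 1)) none) 0 with
        | some j => i + j + 1
        | none => lines.length + 1
      PySem.List.slice lines (some (i : Int)) (some (Int.ofNat nxt)) :: loopA lines (i + 1) rest
    else loopA lines (i + 1) rest

def iter_prpts_py (prpts_lines : List String) : List (List String) :=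
  loopA prpts_lines 0 prpts_lines

-- ===== PORT B =====
-- the comprehension of B: indices (from i) of the lines containing ":"
def colIdxB (i : Nat) : List String → List Nat
  | [] => []
  | l :: ls => if PySem.Str.isIn ":" l then i :: colIdxB (i + 1) ls else colIdxB (i + 1) ls

def iter_prpts_py_alt (prpts_lines : List String) : List (List String) :=
  let idxs := colIdxB 0 prpts_lines
  let bounds := PySem.List.slice idxs (some 1) none ++ [prpts_lines.length]
  (idxs.zip bounds).map (fun p =>
    PySem.List.slice prpts_lines (some (p.1 : Int)) (some (p.2 : Int)))

-- ===== PRECONDITION & SPEC =====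
def Spec_iter_prpts_py (prpts_lines : List String) (out : List (List String)) : Prop := out = iter_prpts_py_alt prpts_lines
instance (prpts_lines : List String) (out : List (List String)) : Decidable (Spec_iter_prpts_py prpts_lines out) := by unfold Spec_iter_prpts_py; infer_instance

-- ===== CLAIM (what is proved, stated in full; the proofs are below) =====
def Claim_equal_iter_prpts_py : Prop := ∀ (prpts_lines : List String), Dom_iter_prpts_py prpts_lines → Spec_iter_prpts_py prpts_lines (iter_prpts_py prpts_lines)

-- ===== LEMMAS AND PROOFS =====

-- proof-side form of B's pairing: each colon index with its successor (or the list length)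
def goB (lines : List String) : List Nat → List (List String)
  | [] => []
  | s :: t =>
    PySem.List.slice lines (some (s : Int)) (some (((t.headD lines.length) : Nat) : Int)) :: goB lines t

lemma findNextA_eq_head (xs : List String) (j : Nat) :
    findNextA xs j = (colIdxB j xs).head? := by
  induction xs generalizing j with
  | nil => rfl
  | cons l ls ih =>
    simp only [findNextA, colIdxB]
    split_ifs <;> simp [ih]

lemma colIdxB_shift (xs : List String) (n m : Nat) :
    colIdxB (n + m) xs = (colIdxB n xs).map (· + m) := by
  induction xs generalizing n with
  | nil => rfl
  | cons l ls ih =>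
    simp only [colIdxB]
    have h1 : n + m + 1 = (n + 1) + m := by omega
    split_ifs <;> simp [h1, ih]

lemma slice_clamp (lines : List String) (i : Nat) :
    PySem.List.slice lines (some (i : Int)) (some ((lines.length + 1 : Nat) : Int)) =
    PySem.List.slice lines (some (i : Int)) (some ((lines.length : Nat) : Int)) := by
  rw [PySem.List.slice_natCast, PySem.List.slice_natCast]
  have h : (lines.drop i).length ≤ lines.length - i := by simp
  rw [List.take_of_length_le (by omega), List.take_of_length_le (by omega)]

lemma loopA_eq_goB (lines : List String) (i : Nat) (rest : List String)
    (hrest : rest = lines.drop i) :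
    loopA lines i rest = goB lines (colIdxB i rest) := by
  induction rest generalizing i with
  | nil => simp [loopA, colIdxB, goB]
  | cons line rest' ih =>
    have hdrop : rest' = lines.drop (i + 1) := by
      rw [← List.drop_drop, ← hrest]; rfl
    simp only [loopA, colIdxB]
    split_ifs with hc
    · simp only [goB]
      rw [ih (i + 1) hdrop]
      congr 1
      -- the heads agree: A's computed next index = B's successor bound
      have hcast : ((i : Int) + 1) = ((i + 1 : Nat) : Int) := by push_cast; ring
      rw [hcast, PySem.List.slice_from_natCast, ← hdrop, findNextA_eq_head rest' 0]
      have hsh : colIdxB (i + 1) rest' = (colIdxB 0 rest').map (· + (i + 1)) := by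
        simpa using colIdxB_shift rest' 0 (i + 1)
      cases hh : (colIdxB 0 rest').head? with
      | none =>
        have hnil : colIdxB 0 rest' = [] := List.head?_eq_none_iff.mp hh
        simp only [hsh, hnil, List.map_nil, List.headD_nil, Int.ofNat_eq_natCast]
        exact slice_clamp lines i
      | some j =>
        obtain ⟨t, ht⟩ : ∃ t, colIdxB 0 rest' = j :: t := by
          cases hl : colIdxB 0 rest' with
          | nil => rw [hl] at hh; simp at hh
          | cons a l => rw [hl] at hh; simp at hh; exact ⟨l, by simp [hh]⟩
        simp only [hsh, ht, List.map_cons, List.headD_cons, Int.ofNat_eq_natCast]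
        congr 2
        omega
    · rw [ih (i + 1) hdrop]

lemma zip_eq_goB (lines : List String) (idxs : List Nat) :
    (idxs.zip (idxs.tail ++ [lines.length])).map (fun p =>
      PySem.List.slice lines (some (p.1 : Int)) (some (p.2 : Int))) = goB lines idxs := by
  induction idxs with
  | nil => rfl
  | cons s t ih =>
    cases t with
    | nil => simp [goB]
    | cons s' t' =>
      simp only [List.tail_cons] at ih ⊢
      rw [List.cons_append, List.zip_cons_cons, List.map_cons, ih]
      simp [goB]

lemma alt_eq_goB (lines : List String) :
    iter_prpts_py_alt lines = goB lines (colIdxB 0 lines) := by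
  simp only [iter_prpts_py_alt, PySem.List.slice_from_one]
  exact zip_eq_goB lines (colIdxB 0 lines)

-- ===== VERDICT (by name: the statement is the Claim_ definition above) =====
theorem iter_prpts_py_spec : Claim_equal_iter_prpts_py := by
  intro lines _
  unfold Spec_iter_prpts_py iter_prpts_py
  rw [alt_eq_goB, loopA_eq_goB lines 0 lines (by simp)]
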